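-- pv_equiv track=rewrite | github.com/m-beau/NeuroPyxels | npyx/behav.py | frameid_vidpath
-- ===== SOURCE A (Python) =====
-- def frameid_vidpath(frameid, nframes, videos):
--     '''Return relative frame id and respective video
--     from absolute frame index'''
--     assert len(nframes)==len(videos)
--     cumfcount=0
--     for vid_i in range(len(videos)):
--         rel_id=frameid-cumfcount
--         vidpath=videos[vid_i]
--         cumfcount+=nframes[vid_i]
--         if (cumfcount-1)>=frameid:
--             return rel_id, vidpath
-- ===== SOURCE B (Python) =====
-- def frameid_vidpath(frameid, nframes, videos):
--     '''Return relative frame id and respective video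
--     from absolute frame index'''
--     assert len(nframes)==len(videos)
--     # prefix-sum table + binary search for the first video whose
--     # cumulative frame count exceeds frameid
--     C = []
--     total = 0
--     for n in nframes:
--         total += n
--         C.append(total)
--     lo, hi = 0, len(C)
--     while lo < hi:
--         mid = (lo + hi) // 2
--         if C[mid] <= frameid:
--             lo = mid + 1
--         else:
--             hi = mid
--     if lo < len(videos):
--         return frameid - (C[lo] - nframes[lo]), videos[lo]
-- ===== Notes on version B (the rewrite author's own statement) =====
-- stated objective: alternative
-- what changed: The accumulating early-exit linear scan is replaced by building a prefix-sum table once and locating the first video whose cumulative count exceeds frameid with a hand-written binary search (bisect_right).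
-- outside the precondition, e.g. on frameid_vidpath(1, [2, -1, 5], ['a', 'b', 'c']): A returns (1, 'a'), B returns (0, 'c'); on frameid_vidpath(-1, [], []): A returns None, B returns None
import Mathlib
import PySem

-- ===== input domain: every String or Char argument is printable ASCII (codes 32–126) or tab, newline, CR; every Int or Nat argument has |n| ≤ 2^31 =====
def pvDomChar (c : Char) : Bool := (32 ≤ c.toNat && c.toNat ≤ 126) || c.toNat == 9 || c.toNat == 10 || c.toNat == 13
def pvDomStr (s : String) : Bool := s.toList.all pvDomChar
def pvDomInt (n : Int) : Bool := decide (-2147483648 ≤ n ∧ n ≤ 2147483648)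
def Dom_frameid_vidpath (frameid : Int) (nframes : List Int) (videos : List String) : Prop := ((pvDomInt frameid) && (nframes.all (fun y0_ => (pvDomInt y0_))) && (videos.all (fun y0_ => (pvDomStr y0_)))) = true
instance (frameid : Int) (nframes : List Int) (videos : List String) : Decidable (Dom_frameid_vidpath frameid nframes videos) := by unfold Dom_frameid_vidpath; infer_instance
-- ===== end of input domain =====

-- ===== PORT A =====
-- B replaces A's accumulating early-exit linear scan with a prefix-sum table plus
-- binary search (same result on Pre_; the proof is a bisect-correctness argument).
-- A's loop: index i, running cumulative count; returns at the first i whose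
-- cumulative count exceeds frameid.  nframes[vid_i] is read with getD 0: exact
-- whenever the lengths are equal, which A's assert (and Pre_) guarantees.
def frameid_vidpath_loop (frameid : Int) (nframes : List Int) (videos : List String)
    (i : Nat) (cumfcount : Int) : Int × String :=
  if h : i < videos.length then
    let rel_id := frameid - cumfcount
    let vidpath := videos[i]
    let cumfcount' := cumfcount + nframes.getD i 0
    if cumfcount' - 1 ≥ frameid then (rel_id, vidpath)
    else frameid_vidpath_loop frameid nframes videos (i + 1) cumfcount'
  else (0, "")  -- Python falls through and returns None here; excluded by Pre_
termination_by videos.length - i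

def frameid_vidpath (frameid : Int) (nframes : List Int) (videos : List String) : Int × String :=
  frameid_vidpath_loop frameid nframes videos 0 0

-- ===== PORT B =====
-- the prefix-sum table C (B's first loop: running total, append)
def pvCumsum (acc : Int) : List Int → List Int
  | [] => []
  | x :: xs => (acc + x) :: pvCumsum (acc + x) xs

-- B's while-loop: bisect_right on C
def pvBisectRight (C : List Int) (x : Int) (lo hi : Nat) : Nat :=
  if _h : lo < hi then
    let mid := (lo + hi) / 2
    if C.getD mid 0 ≤ x then pvBisectRight C x (mid + 1) hi
    else pvBisectRight C x lo mid
  else lo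
termination_by hi - lo
decreasing_by all_goals omega

def frameid_vidpath_alt (frameid : Int) (nframes : List Int) (videos : List String) : Int × String :=
  let C := pvCumsum 0 nframes
  let lo := pvBisectRight C frameid 0 C.length
  if lo < videos.length then
    (frameid - (C.getD lo 0 - nframes.getD lo 0), videos.getD lo "")
  else (0, "")  -- Python falls through and returns None here; excluded by Pre_

-- ===== PRECONDITION & SPEC =====
-- Pre_ restricts to the function's natural domain and to inputs where A returns a
-- tuple: equal-length lists (else A's assert raises), non-negative frame counts
-- (frame counts are sizes; on negative entries the prefix sums are not monotone and
-- both answers are accidents of the traversal -- see the cite in claim.json), and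
-- frameid below the total frame count with at least one video (else A falls off the
-- loop and returns None, which is not a value of type Int × String).
def Pre_frameid_vidpath (frameid : Int) (nframes : List Int) (videos : List String) : Prop :=
  nframes.length = videos.length ∧ (∀ n ∈ nframes, 0 ≤ n) ∧ frameid < nframes.sum ∧ videos ≠ []
instance (frameid : Int) (nframes : List Int) (videos : List String) : Decidable (Pre_frameid_vidpath frameid nframes videos) := by unfold Pre_frameid_vidpath; infer_instance

def pvWitness_frameid_vidpath : Int × List Int × List String := (3, [2, 0, 4], ["a", "b", "c"])

def Spec_frameid_vidpath (frameid : Int) (nframes : List Int) (videos : List String) (out : Int × String) : Prop := out = frameid_vidpath_alt frameid nframes videos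
instance (frameid : Int) (nframes : List Int) (videos : List String) (out : Int × String) : Decidable (Spec_frameid_vidpath frameid nframes videos out) := by unfold Spec_frameid_vidpath; infer_instance

-- ===== CLAIM (what is proved, stated in full; the proofs are below) =====
def Claim_equal_frameid_vidpath : Prop := ∀ (frameid : Int) (nframes : List Int) (videos : List String), Dom_frameid_vidpath frameid nframes videos → Pre_frameid_vidpath frameid nframes videos → Spec_frameid_vidpath frameid nframes videos (frameid_vidpath frameid nframes videos)

-- ===== LEMMAS AND PROOFS =====

lemma pvCumsum_length (acc : Int) (xs : List Int) : (pvCumsum acc xs).length = xs.length := by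
  induction xs generalizing acc with
  | nil => rfl
  | cons x xs ih => simp [pvCumsum, ih]

lemma pvCumsum_getD (acc : Int) (xs : List Int) (i : Nat) (h : i < xs.length) :
    (pvCumsum acc xs).getD i 0 = acc + (xs.take (i + 1)).sum := by
  induction xs generalizing acc i with
  | nil => simp at h
  | cons x xs ih =>
    cases i with
    | zero => simp [pvCumsum]
    | succ i =>
      simp only [pvCumsum, List.getD_cons_succ, List.take_succ_cons, List.sum_cons]
      rw [ih _ _ (by simpa using h)]
      ring

lemma take_succ_sum (xs : List Int) (i : Nat) (h : i < xs.length) :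
    (xs.take (i + 1)).sum = (xs.take i).sum + xs.getD i 0 := by
  induction xs generalizing i with
  | nil => simp at h
  | cons x xs ih =>
    cases i with
    | zero => simp
    | succ i =>
      simp only [List.take_succ_cons, List.sum_cons, List.getD_cons_succ]
      rw [ih _ (by simpa using h)]
      ring

lemma take_sum_mono (xs : List Int) (hpos : ∀ n ∈ xs, 0 ≤ n) {i j : Nat} (hij : i ≤ j) :
    (xs.take i).sum ≤ (xs.take j).sum := by
  induction xs generalizing i j with
  | nil => simp
  | cons x xs ih =>
    cases i with
    | zero =>
      simp only [List.take_zero, List.sum_nil]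
      refine List.sum_nonneg ?_
      intro y hy
      exact hpos y (List.mem_of_mem_take hy)
    | succ i =>
      cases j with
      | zero => omega
      | succ j =>
        simp only [List.take_succ_cons, List.sum_cons]
        have := ih (fun n hn => hpos n (List.mem_cons_of_mem _ hn)) (Nat.succ_le_succ_iff.mp hij)
        omega

lemma bisect_spec_fuel (C : List Int) (x : Int)
    (hmono : ∀ i j : Nat, i ≤ j → j < C.length → C.getD i 0 ≤ C.getD j 0) :
    ∀ (fuel lo hi : Nat), hi - lo ≤ fuel → lo ≤ hi → hi ≤ C.length →
    (∀ k, k < lo → C.getD k 0 ≤ x) → (∀ k, hi ≤ k → k < C.length → x < C.getD k 0) →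
    lo ≤ pvBisectRight C x lo hi ∧ pvBisectRight C x lo hi ≤ hi ∧
    (∀ k, k < pvBisectRight C x lo hi → C.getD k 0 ≤ x) ∧
    (∀ k, pvBisectRight C x lo hi ≤ k → k < C.length → x < C.getD k 0) := by
  intro fuel
  induction fuel with
  | zero =>
    intro lo hi hfuel hlohi hhiC hlo hhi
    rw [pvBisectRight, dif_neg (by omega : ¬ lo < hi)]
    exact ⟨le_refl _, hlohi, hlo, fun k hk hkC => hhi k (by omega) hkC⟩
  | succ n ih =>
    intro lo hi hfuel hlohi hhiC hlo hhi
    by_cases h : lo < hi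
    · rw [pvBisectRight, dif_pos h]
      by_cases hc : C.getD ((lo + hi) / 2) 0 ≤ x
      · rw [if_pos hc]
        have h1 : ∀ k, k < (lo + hi) / 2 + 1 → C.getD k 0 ≤ x := by
          intro k hk
          exact le_trans (hmono k ((lo + hi) / 2) (by omega) (by omega)) hc
        have := ih ((lo + hi) / 2 + 1) hi (by omega) (by omega) hhiC h1 hhi
        exact ⟨by omega, this.2.1, this.2.2.1, this.2.2.2⟩
      · rw [if_neg hc]
        have h2 : ∀ k, (lo + hi) / 2 ≤ k → k < C.length → x < C.getD k 0 := by
          intro k hk hkC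
          exact lt_of_lt_of_le (by omega : x < C.getD ((lo + hi) / 2) 0) (hmono _ k hk hkC)
        have := ih lo ((lo + hi) / 2) (by omega) (by omega) (by omega) hlo h2
        exact ⟨this.1, by omega, this.2.2.1, this.2.2.2⟩
    · rw [pvBisectRight, dif_neg h]
      exact ⟨le_refl _, hlohi, hlo, fun k hk hkC => hhi k (by omega) hkC⟩

lemma bisect_spec (C : List Int) (x : Int)
    (hmono : ∀ i j : Nat, i ≤ j → j < C.length → C.getD i 0 ≤ C.getD j 0)
    (lo hi : Nat) (hlohi : lo ≤ hi) (hhiC : hi ≤ C.length)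
    (hlo : ∀ k, k < lo → C.getD k 0 ≤ x) (hhi : ∀ k, hi ≤ k → k < C.length → x < C.getD k 0) :
    lo ≤ pvBisectRight C x lo hi ∧ pvBisectRight C x lo hi ≤ hi ∧
    (∀ k, k < pvBisectRight C x lo hi → C.getD k 0 ≤ x) ∧
    (∀ k, pvBisectRight C x lo hi ≤ k → k < C.length → x < C.getD k 0) :=
  bisect_spec_fuel C x hmono (hi - lo) lo hi (le_refl _) hlohi hhiC hlo hhi

lemma loop_eq (frameid : Int) (nframes : List Int) (videos : List String)
    (hlen : nframes.length = videos.length)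
    (r : Nat) (hr : r < videos.length)
    (hbelow : ∀ k, k < r → (nframes.take (k + 1)).sum ≤ frameid)
    (hit : frameid < (nframes.take (r + 1)).sum) :
    ∀ i, i ≤ r → frameid_vidpath_loop frameid nframes videos i ((nframes.take i).sum) =
      (frameid - (nframes.take r).sum, videos.getD r "") := by
  intro i hi
  induction hd : r - i generalizing i with
  | zero =>
    have hir : i = r := by omega
    subst hir
    rw [frameid_vidpath_loop]
    simp only [hr, dif_pos]
    rw [if_pos (by have := take_succ_sum nframes i (by omega); omega)]
    simp [List.getD, List.getElem?_eq_getElem hr]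
  | succ m ih =>
    have hilt : i < r := by omega
    rw [frameid_vidpath_loop]
    simp only [(by omega : i < videos.length), dif_pos]
    rw [if_neg (by have h1 := hbelow i hilt; have := take_succ_sum nframes i (by omega); omega)]
    rw [(by have := take_succ_sum nframes i (by omega); omega :
        (nframes.take i).sum + nframes.getD i 0 = (nframes.take (i + 1)).sum)]
    exact ih (i + 1) (by omega) (by omega)

-- ===== VERDICT (by name: the statement is the Claim_ definition above) =====
theorem frameid_vidpath_spec : Claim_equal_frameid_vidpath := by
  intro frameid nframes videos _ hpre
  obtain ⟨hlen, hpos, hsum, hne⟩ := hpre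
  unfold Spec_frameid_vidpath frameid_vidpath
  set C := pvCumsum 0 nframes with hC
  have hClen : C.length = nframes.length := pvCumsum_length 0 nframes
  have hCget : ∀ i, i < nframes.length → C.getD i 0 = (nframes.take (i + 1)).sum := by
    intro i hi
    rw [hC, pvCumsum_getD 0 nframes i hi]; ring
  have hmono : ∀ i j : Nat, i ≤ j → j < C.length → C.getD i 0 ≤ C.getD j 0 := by
    intro i j hij hj
    rw [hCget i (by omega), hCget j (by omega)]
    exact take_sum_mono nframes hpos (by omega)
  have hn0 : 0 < nframes.length := by
    rw [hlen]; exact List.length_pos_iff.mpr hne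
  obtain ⟨h1, h2, h3, h4⟩ := bisect_spec C frameid hmono 0 C.length (by omega) (le_refl _)
    (by omega) (by omega)
  set r := pvBisectRight C frameid 0 C.length with hrdef
  have hlast : C.getD (nframes.length - 1) 0 = nframes.sum := by
    rw [hCget _ (by omega)]
    congr 1
    rw [List.take_of_length_le (by omega)]
  have hrlt : r < nframes.length := by
    by_contra hcon
    have := h3 (nframes.length - 1) (by omega)
    rw [hlast] at this
    omega
  have hrv : r < videos.length := by omega
  have halt : frameid_vidpath_alt frameid nframes videos =
      if r < videos.length then
        (frameid - (C.getD r 0 - nframes.getD r 0), videos.getD r "")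
      else (0, "") := rfl
  rw [halt, if_pos hrv]
  have hloop := loop_eq frameid nframes videos hlen r hrv
      (fun k hk => by have := h3 k (by omega); rwa [hCget k (by omega)] at this)
      (by have := h4 r (le_refl _) (by omega); rwa [hCget r hrlt] at this)
      0 (by omega)
  simp only [List.take_zero, List.sum_nil] at hloop
  rw [hloop, hCget r hrlt, take_succ_sum nframes r hrlt]
  congr 1
  ring
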